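-- pv_equiv track=rewrite | github.com/fa1seut0pia/mirror-speed-test | app.py | select_layer
-- ===== SOURCE A (Python) =====
-- class MirrorTestError(Exception):
--     pass
--
-- def select_layer(layers, target_bytes):
--     sized_layers = [layer for layer in layers if isinstance(layer.get("size"), int)]
--     if not sized_layers:
--         raise MirrorTestError("manifest layers have no size info")
--     within_window = [
--         layer for layer in sized_layers if target_bytes <= layer["size"] <= target_bytes * 8
--     ]
--     if within_window:
--         return min(within_window, key=lambda layer: abs(layer["size"] - target_bytes))
--     larger = [layer for layer in sized_layers if layer["size"] >= target_bytes]
--     if larger: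
--         return min(larger, key=lambda layer: layer["size"])
--     return max(sized_layers, key=lambda layer: layer["size"])
-- ===== SOURCE B (Python) =====
-- class MirrorTestError(Exception):
--     pass
--
-- def select_layer(layers, target_bytes):
--     sized_layers = [layer for layer in layers if isinstance(layer.get("size"), int)]
--     if not sized_layers:
--         raise MirrorTestError("manifest layers have no size info")
--
--     def priority(layer):
--         size = layer["size"]
--         if target_bytes <= size <= target_bytes * 8:
--             return (0, abs(size - target_bytes))
--         if size >= target_bytes:
--             return (1, size)
--         return (2, -size)
--
--     return min(sized_layers, key=priority)
-- ===== Notes on version B (the rewrite author's own statement) =====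
-- stated objective: alternative
-- what changed: Replaces the three-way filter-and-branch cascade (window filter + min, larger filter + min, fallback max) with a single reduction: one min over all sized layers under a composite (category, secondary) priority key.
import Mathlib
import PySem

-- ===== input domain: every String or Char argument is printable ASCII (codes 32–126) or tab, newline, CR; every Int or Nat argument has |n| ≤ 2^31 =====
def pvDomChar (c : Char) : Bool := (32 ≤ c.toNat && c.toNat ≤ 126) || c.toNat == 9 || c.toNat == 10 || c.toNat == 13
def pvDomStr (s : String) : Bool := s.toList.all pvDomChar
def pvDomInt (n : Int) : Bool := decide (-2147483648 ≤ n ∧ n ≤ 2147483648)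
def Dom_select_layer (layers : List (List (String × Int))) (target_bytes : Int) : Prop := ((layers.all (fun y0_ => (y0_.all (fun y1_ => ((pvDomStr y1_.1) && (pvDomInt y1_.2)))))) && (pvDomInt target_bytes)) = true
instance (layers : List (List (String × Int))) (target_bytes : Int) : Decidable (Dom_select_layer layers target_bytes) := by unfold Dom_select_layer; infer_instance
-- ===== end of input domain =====

-- B replaces A's three-way filter-and-branch cascade by a single min over a composite
-- (category, secondary) priority key; same O(n) cost, different decomposition.

-- ===== PORT A =====
-- layer.get("size"); in the typed port every stored value is an Int, so Python's
-- isinstance(..., int) guard is exactly "the key is present" (bools are ints too).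
def pvGetSize (layer : List (String × Int)) : Option Int :=
  PySem.Dict.get? (PySem.Dict.mk layer) "size"

def select_layer (layers : List (List (String × Int))) (target_bytes : Int) : List (String × Int) :=
  let sized_layers := layers.filter (fun layer => (pvGetSize layer).isSome)
  if sized_layers = [] then []  -- Python raises MirrorTestError here; excluded by Pre_
  else
    -- layer["size"]: the key is present on every member of sized_layers, so getD 0 is exact
    let size := fun (layer : List (String × Int)) => (pvGetSize layer).getD 0
    let within_window := sized_layers.filter
      (fun layer => decide (target_bytes ≤ size layer) && decide (size layer ≤ target_bytes * 8))
    if within_window ≠ [] then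
      (PySem.List.min? within_window (fun layer => |size layer - target_bytes|)).getD []
    else
      let larger := sized_layers.filter (fun layer => decide (size layer ≥ target_bytes))
      if larger ≠ [] then
        (PySem.List.min? larger (fun layer => size layer)).getD []
      else
        (PySem.List.max? sized_layers (fun layer => size layer)).getD []

-- ===== PORT B =====
-- Source B's priority(layer) returns a tuple (category, secondary); per the PySem convention a
-- tuple-keyed min is ported with min2? and the two components of that tuple:
def pvCat (target_bytes : Int) (layer : List (String × Int)) : Int :=
  if target_bytes ≤ (pvGetSize layer).getD 0 ∧ (pvGetSize layer).getD 0 ≤ target_bytes * 8 then 0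
  else if (pvGetSize layer).getD 0 ≥ target_bytes then 1
  else 2

def pvSec (target_bytes : Int) (layer : List (String × Int)) : Int :=
  if target_bytes ≤ (pvGetSize layer).getD 0 ∧ (pvGetSize layer).getD 0 ≤ target_bytes * 8 then
    |(pvGetSize layer).getD 0 - target_bytes|
  else if (pvGetSize layer).getD 0 ≥ target_bytes then (pvGetSize layer).getD 0
  else -(pvGetSize layer).getD 0

def select_layer_alt (layers : List (List (String × Int))) (target_bytes : Int) : List (String × Int) :=
  let sized_layers := layers.filter (fun layer => (pvGetSize layer).isSome)
  if sized_layers = [] then []  -- Python raises MirrorTestError here; excluded by Pre_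
  else (PySem.List.min2? sized_layers (pvCat target_bytes) (pvSec target_bytes)).getD []

-- ===== PRECONDITION & SPEC =====
-- Pre_ excludes exactly the inputs on which A (and B) raise MirrorTestError: no layer has a "size" key.
def Pre_select_layer (layers : List (List (String × Int))) (target_bytes : Int) : Prop :=
  layers.any (fun layer => layer.any (fun p => p.1 == "size")) = true
instance (layers : List (List (String × Int))) (target_bytes : Int) : Decidable (Pre_select_layer layers target_bytes) := by unfold Pre_select_layer; infer_instance

def pvWitness_select_layer : (List (List (String × Int))) × Int := ([[("size", 10)], [("size", 3)]], 4)

def Spec_select_layer (layers : List (List (String × Int))) (target_bytes : Int) (out : List (String × Int)) : Prop := out = select_layer_alt layers target_bytes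
instance (layers : List (List (String × Int))) (target_bytes : Int) (out : List (String × Int)) : Decidable (Spec_select_layer layers target_bytes out) := by unfold Spec_select_layer; infer_instance

-- ===== CLAIM (what is proved, stated in full; the proofs are below) =====
def Claim_equal_select_layer : Prop := ∀ (layers : List (List (String × Int))) (target_bytes : Int), Dom_select_layer layers target_bytes → Pre_select_layer layers target_bytes → Spec_select_layer layers target_bytes (select_layer layers target_bytes)

-- ===== LEMMAS AND PROOFS =====

-- proof-side abbreviations
def pvSz (l : List (String × Int)) : Int := (pvGetSize l).getD 0
def pvB (l : List (String × Int)) : Prop := -2147483648 ≤ pvSz l ∧ pvSz l ≤ 2147483648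
-- single-Int encoding of Source B's (category, secondary) lexicographic key
def pvK (t : Int) (l : List (String × Int)) : Int := pvCat t l * 1099511627776 + pvSec t l
-- the fold step of Python's min(..., key=k) with an Int key
def pvStep {α : Type} (k : α → Int) (acc : Option α) (x : α) : Option α :=
  match acc with
  | none => some x
  | some m => if k x < k m then some x else some m

theorem pv_min?_eq_foldl {α : Type} (s : List α) (k : α → Int) :
    PySem.List.min? s k = s.foldl (pvStep k) none := rfl

-- generic foldl congruence under an invariant
theorem pv_foldl_congr {α β : Type} (P : α → Prop) (Q : β → Prop) (f g : β → α → β)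
    (s : List α) (acc : β) (hs : ∀ x ∈ s, P x) (hacc : Q acc)
    (hfg : ∀ b x, Q b → P x → f b x = g b x)
    (hQ : ∀ b x, Q b → P x → Q (f b x)) :
    s.foldl f acc = s.foldl g acc := by
  induction s generalizing acc with
  | nil => rfl
  | cons x xs ih =>
      have hx : P x := hs x (by simp)
      rw [List.foldl_cons, List.foldl_cons,
        ih (f acc x) (fun y hy => hs y (by simp [hy])) (hQ acc x hacc hx),
        hfg acc x hacc hx]

-- pv_min?_congr: the two keys induce the same comparisons on members of s
theorem pv_min?_congr {α : Type} (k k' : α → Int) (s : List α)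
    (h : ∀ x ∈ s, ∀ y ∈ s, (k x < k y ↔ k' x < k' y)) :
    PySem.List.min? s k = PySem.List.min? s k' := by
  rw [pv_min?_eq_foldl, pv_min?_eq_foldl]
  refine pv_foldl_congr (fun x => x ∈ s) (fun b => ∀ a, b = some a → a ∈ s)
    (pvStep k) (pvStep k') s none (fun x hx => hx) (by simp) ?_ ?_
  · intro b x hb hx
    match b with
    | none => rfl
    | some m =>
        have hm : m ∈ s := hb m rfl
        simp only [pvStep, if_congr (h x hx m hm) rfl rfl]
  · intro b x hb hx
    match b with
    | none => intro a ha; cases ha; exact hx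
    | some m =>
        intro a ha
        simp only [pvStep] at ha
        split at ha <;> cases ha
        · exact hx
        · exact hb _ rfl

-- min with a negated key is Python's max (first extremal in both)
theorem pv_min?_neg {α : Type} (k : α → Int) (s : List α) :
    PySem.List.min? s (fun x => -k x) = PySem.List.max? s k := by
  rw [pv_min?_eq_foldl]
  unfold PySem.List.max?
  refine pv_foldl_congr (fun _ => True) (fun _ => True) _ _ s none (fun _ _ => trivial)
    trivial ?_ (fun _ _ _ _ => trivial)
  intro b x _ _
  match b with
  | none => rfl
  | some m =>
      simp only [pvStep]
      exact if_congr (by omega) rfl rfl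

theorem pvStep_ne_none {α : Type} (k : α → Int) (acc : Option α) (x : α) :
    pvStep k acc x ≠ none := by
  cases acc with
  | none => simp [pvStep]
  | some m => simp only [pvStep]; split <;> simp

theorem pv_foldl_eq_none {α : Type} (k : α → Int) (s : List α) :
    ∀ acc, s.foldl (pvStep k) acc = none → s = [] ∧ acc = none := by
  induction s with
  | nil => intro acc h; exact ⟨rfl, h⟩
  | cons x xs ih =>
      intro acc h
      rw [List.foldl_cons] at h
      exact absurd (ih _ h).2 (pvStep_ne_none k acc x)

-- restriction of a first-min fold to a dominating filter class
theorem pv_filter_aux {α : Type} (k : α → Int) (p : α → Bool) (s₀ : List α)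
    (hdom : ∀ x ∈ s₀, ∀ y ∈ s₀, p x = true → p y = false → k x < k y) :
    ∀ (s : List α), (∀ x ∈ s, x ∈ s₀) → ∀ (accL accR : Option α),
    ((∃ m, accL = some m ∧ accR = some m ∧ p m = true ∧ m ∈ s₀) ∨
     (accR = none ∧ (accL = none ∨ ∃ z, accL = some z ∧ p z = false ∧ z ∈ s₀))) →
    ((∃ m, s.foldl (pvStep k) accL = some m ∧ (s.filter p).foldl (pvStep k) accR = some m ∧
        p m = true ∧ m ∈ s₀) ∨
     ((s.filter p).foldl (pvStep k) accR = none ∧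
      (s.foldl (pvStep k) accL = none ∨
       ∃ z, s.foldl (pvStep k) accL = some z ∧ p z = false ∧ z ∈ s₀))) := by
  intro s
  induction s with
  | nil =>
      intro _ accL accR hinv
      simpa using hinv
  | cons x xs ih =>
      intro hsub accL accR hinv
      have hx : x ∈ s₀ := hsub x (by simp)
      have hsub' : ∀ y ∈ xs, y ∈ s₀ := fun y hy => hsub y (by simp [hy])
      rcases hpx : p x with _ | _
      · -- p x = false : x is dropped from the filtered list
        rw [List.filter_cons_of_neg (by simp [hpx]), List.foldl_cons]
        refine ih hsub' (pvStep k accL x) accR ?_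
        rcases hinv with ⟨m, hL, hR, hpm, hms⟩ | ⟨hR, hL⟩
        · left
          refine ⟨m, ?_, hR, hpm, hms⟩
          have : ¬ k x < k m := by
            have := hdom m hms x hx hpm hpx
            omega
          simp [pvStep, hL, this]
        · right
          refine ⟨hR, ?_⟩
          rcases hL with hL | ⟨z, hL, hpz, hzs⟩
          · right; exact ⟨x, by simp [pvStep, hL], hpx, hx⟩
          · right
            by_cases hlt : k x < k z
            · exact ⟨x, by simp [pvStep, hL, hlt], hpx, hx⟩
            · exact ⟨z, by simp [pvStep, hL, hlt], hpz, hzs⟩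
      · -- p x = true : x is kept
        rw [List.filter_cons_of_pos (by simp [hpx]), List.foldl_cons, List.foldl_cons]
        refine ih hsub' (pvStep k accL x) (pvStep k accR x) ?_
        rcases hinv with ⟨m, hL, hR, hpm, hms⟩ | ⟨hR, hL⟩
        · left
          by_cases hlt : k x < k m
          · exact ⟨x, by simp [pvStep, hL, hlt], by simp [pvStep, hR, hlt], hpx, hx⟩
          · exact ⟨m, by simp [pvStep, hL, hlt], by simp [pvStep, hR, hlt], hpm, hms⟩
        · left
          rcases hL with hL | ⟨z, hL, hpz, hzs⟩
          · exact ⟨x, by simp [pvStep, hL], by simp [pvStep, hR], hpx, hx⟩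
          · have hlt : k x < k z := hdom x hx z hzs hpx hpz
            exact ⟨x, by simp [pvStep, hL, hlt], by simp [pvStep, hR], hpx, hx⟩

theorem pv_min?_filter {α : Type} (k : α → Int) (p : α → Bool) (s : List α)
    (hdom : ∀ x ∈ s, ∀ y ∈ s, p x = true → p y = false → k x < k y)
    (hne : s.filter p ≠ []) :
    PySem.List.min? s k = PySem.List.min? (s.filter p) k := by
  rcases pv_filter_aux k p s hdom s (fun x hx => hx) none none
      (Or.inr ⟨rfl, Or.inl rfl⟩) with ⟨m, hL, hR, _, _⟩ | ⟨hR, _⟩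
  · rw [pv_min?_eq_foldl, pv_min?_eq_foldl, hL, hR]
  · exact absurd (pv_foldl_eq_none k (s.filter p) none hR).1 hne

theorem pv_cat_range (t : Int) (l : List (String × Int)) : 0 ≤ pvCat t l ∧ pvCat t l ≤ 2 := by
  unfold pvCat; split_ifs <;> omega

theorem pv_sec_bound (t : Int) (ht : -2147483648 ≤ t ∧ t ≤ 2147483648)
    (l : List (String × Int)) (hl : pvB l) :
    -4294967296 ≤ pvSec t l ∧ pvSec t l ≤ 4294967296 := by
  unfold pvB pvSz at hl
  unfold pvSec
  rcases abs_cases ((pvGetSize l).getD 0 - t) with ⟨h1, h2⟩ | ⟨h1, h2⟩ <;>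
    split_ifs <;> omega

-- the Bool lexicographic test of min2? agrees with the single-Int key pvK
theorem pv_lex_iff (t : Int) (ht : -2147483648 ≤ t ∧ t ≤ 2147483648)
    (x m : List (String × Int)) (hx : pvB x) (hm : pvB m) :
    ((decide (pvCat t x < pvCat t m) ||
      (!decide (pvCat t m < pvCat t x) && decide (pvSec t x < pvSec t m))) = true) ↔
    pvK t x < pvK t m := by
  have c1 := pv_cat_range t x
  have c2 := pv_cat_range t m
  have s1 := pv_sec_bound t ht x hx
  have s2 := pv_sec_bound t ht m hm
  unfold pvK
  simp only [Bool.or_eq_true, Bool.and_eq_true, Bool.not_eq_eq_eq_not, Bool.not_true,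
    decide_eq_true_eq, decide_eq_false_iff_not]
  omega

theorem pv_min2_eq_minK (t : Int) (ht : -2147483648 ≤ t ∧ t ≤ 2147483648)
    (s : List (List (String × Int))) (hb : ∀ l ∈ s, pvB l) :
    PySem.List.min2? s (pvCat t) (pvSec t) = PySem.List.min? s (pvK t) := by
  unfold PySem.List.min2? PySem.List.min?
  refine pv_foldl_congr pvB (fun b => ∀ a, b = some a → pvB a) _ _ s none hb (by simp) ?_ ?_
  · intro b x hbq hpx
    match b with
    | none => rfl
    | some m =>
        have hm : pvB m := hbq m rfl
        simp only [if_congr (pv_lex_iff t ht x m hpx hm) rfl rfl]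
  · intro b x hbq hpx
    match b with
    | none => intro a ha; cases ha; exact hpx
    | some m =>
        intro a ha
        simp only at ha
        split at ha <;> cases ha
        · exact hpx
        · exact hbq _ rfl

-- every layer drawn from the domain has a bounded size value
theorem pv_size_bound (layers : List (List (String × Int))) (t : Int)
    (h : Dom_select_layer layers t) : ∀ l ∈ layers, pvB l := by
  intro l hl
  unfold Dom_select_layer at h
  rw [Bool.and_eq_true, List.all_eq_true] at h
  have hall := h.1 l hl
  rw [List.all_eq_true] at hall
  unfold pvB pvSz pvGetSize PySem.Dict.get?
  cases hfind : List.find? (fun p => p.1 == "size") (PySem.Dict.mk l).items with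
  | none => simp
  | some p =>
      have hp : p ∈ l := List.mem_of_find?_eq_some hfind
      have h2 := hall p hp
      rw [Bool.and_eq_true] at h2
      have h3 : -2147483648 ≤ p.2 ∧ p.2 ≤ 2147483648 := by
        simpa [pvDomInt] using h2.2
      simpa using h3

theorem pv_dom_t (layers : List (List (String × Int))) (t : Int)
    (h : Dom_select_layer layers t) : -2147483648 ≤ t ∧ t ≤ 2147483648 := by
  unfold Dom_select_layer at h
  rw [Bool.and_eq_true] at h
  have := h.2
  simpa [pvDomInt] using this

-- category characterisations (conditions as in pvCat/pvSec)
theorem pv_cat0_iff (t : Int) (l : List (String × Int)) :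
    pvCat t l = 0 ↔ (t ≤ (pvGetSize l).getD 0 ∧ (pvGetSize l).getD 0 ≤ t * 8) := by
  unfold pvCat; split_ifs with h1 h2 <;> simp_all

theorem pv_cat1_iff (t : Int) (l : List (String × Int))
    (hno : ¬ (t ≤ (pvGetSize l).getD 0 ∧ (pvGetSize l).getD 0 ≤ t * 8)) :
    pvCat t l = 1 ↔ (pvGetSize l).getD 0 ≥ t := by
  unfold pvCat; split_ifs with h1 h2 <;> simp_all

theorem pv_sec0 (t : Int) (l : List (String × Int)) (h : pvCat t l = 0) :
    pvSec t l = |(pvGetSize l).getD 0 - t| := by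
  unfold pvCat at h; unfold pvSec; split_ifs at h ⊢ <;> simp_all

theorem pv_sec1 (t : Int) (l : List (String × Int)) (h : pvCat t l = 1) :
    pvSec t l = (pvGetSize l).getD 0 := by
  unfold pvCat at h; unfold pvSec; split_ifs at h ⊢ <;> simp_all

theorem pv_sec2 (t : Int) (l : List (String × Int)) (h : pvCat t l = 2) :
    pvSec t l = -(pvGetSize l).getD 0 := by
  unfold pvCat at h; unfold pvSec; split_ifs at h ⊢ <;> simp_all

-- a strictly smaller category always wins under pvK
theorem pv_K_dom (t : Int) (ht : -2147483648 ≤ t ∧ t ≤ 2147483648)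
    (x y : List (String × Int)) (hx : pvB x) (hy : pvB y)
    (h : pvCat t x < pvCat t y) : pvK t x < pvK t y := by
  have s1 := pv_sec_bound t ht x hx
  have s2 := pv_sec_bound t ht y hy
  unfold pvK; omega

-- ===== VERDICT (by name: the statement is the Claim_ definition above) =====
theorem select_layer_spec : Claim_equal_select_layer := by
  intro layers t hdom hpre
  unfold Spec_select_layer select_layer select_layer_alt
  have ht := pv_dom_t layers t hdom
  set s := layers.filter (fun layer => (pvGetSize layer).isSome) with hs_def
  have hbAll : ∀ l ∈ s, pvB l := fun l hl =>
    pv_size_bound layers t hdom l (List.mem_of_mem_filter hl)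
  have hsne : s ≠ [] := by
    unfold Pre_select_layer at hpre
    rw [List.any_eq_true] at hpre
    obtain ⟨layer, hmem, hany⟩ := hpre
    have hsome : (pvGetSize layer).isSome = true := by
      unfold pvGetSize PySem.Dict.get?
      rw [Option.isSome_map]
      rw [List.find?_isSome]
      rw [List.any_eq_true] at hany
      obtain ⟨p, hp, hps⟩ := hany
      exact ⟨p, hp, hps⟩
    intro hnil
    have : layer ∈ s := by rw [hs_def, List.mem_filter]; exact ⟨hmem, hsome⟩
    simp [hnil] at this
  rw [if_neg hsne, if_neg hsne]
  have hB : PySem.List.min2? s (pvCat t) (pvSec t) = PySem.List.min? s (pvK t) :=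
    pv_min2_eq_minK t ht s hbAll
  set w := s.filter (fun layer =>
    decide (t ≤ (pvGetSize layer).getD 0) && decide ((pvGetSize layer).getD 0 ≤ t * 8)) with hw_def
  by_cases hw : w ≠ []
  · -- a layer inside the window exists: both sides pick the first window layer
    -- with minimal |size - target|
    rw [if_pos hw, hB]
    have hfc : s.filter (fun l => decide (pvCat t l = 0)) = w := by
      rw [hw_def]
      exact List.filter_congr (fun l _ => by
        rw [← Bool.decide_and, decide_eq_decide]
        exact pv_cat0_iff t l)
    rw [pv_min?_filter (pvK t) (fun l => decide (pvCat t l = 0)) s ?dom (by rw [hfc]; exact hw),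
        hfc]
    · have h2 : PySem.List.min? w (pvK t) =
          PySem.List.min? w (fun layer => |(pvGetSize layer).getD 0 - t|) :=
        pv_min?_congr _ _ w (fun x hx y hy => ?_)
      · rw [h2]
      have hx0 : pvCat t x = 0 := by
        rw [hw_def, List.mem_filter] at hx
        exact (pv_cat0_iff t x).mpr (by
          have := hx.2; simp only [Bool.and_eq_true, decide_eq_true_eq] at this; exact this)
      have hy0 : pvCat t y = 0 := by
        rw [hw_def, List.mem_filter] at hy
        exact (pv_cat0_iff t y).mpr (by
          have := hy.2; simp only [Bool.and_eq_true, decide_eq_true_eq] at this; exact this)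
      unfold pvK
      rw [hx0, hy0, pv_sec0 t x hx0, pv_sec0 t y hy0]
      omega
    case dom =>
      intro x hx y hy hpx hpy
      simp only [decide_eq_true_eq] at hpx
      simp only [decide_eq_false_iff_not] at hpy
      have := pv_cat_range t y
      exact pv_K_dom t ht x y (hbAll x hx) (hbAll y hy) (by omega)
  · -- no layer inside the window
    rw [if_neg hw]
    have hnowin : ∀ l ∈ s, ¬ (t ≤ (pvGetSize l).getD 0 ∧ (pvGetSize l).getD 0 ≤ t * 8) := by
      intro l hl hcon
      have : l ∈ w := by
        rw [hw_def, List.mem_filter]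
        exact ⟨hl, by simp [hcon.1, hcon.2]⟩
      rw [not_not.mp (fun h => hw h)] at this
      simp at this
    have hcat_ne0 : ∀ l ∈ s, pvCat t l ≠ 0 := fun l hl h0 =>
      hnowin l hl ((pv_cat0_iff t l).mp h0)
    set g := s.filter (fun layer => decide ((pvGetSize layer).getD 0 ≥ t)) with hg_def
    by_cases hg : g ≠ []
    · -- some layer at least as large as the target: first minimal-size such layer
      rw [if_pos hg, hB]
      have hfc : s.filter (fun l => decide (pvCat t l = 1)) = g := by
        rw [hg_def]
        exact List.filter_congr (fun l hl => by
          rw [decide_eq_decide]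
          exact pv_cat1_iff t l (hnowin l hl))
      rw [pv_min?_filter (pvK t) (fun l => decide (pvCat t l = 1)) s ?dom1 (by rw [hfc]; exact hg),
          hfc]
      · have h2 : PySem.List.min? g (pvK t) =
            PySem.List.min? g (fun layer => (pvGetSize layer).getD 0) :=
          pv_min?_congr _ _ g (fun x hx y hy => ?_)
        · rw [h2]
        have hx1 : pvCat t x = 1 := by
          rw [hg_def, List.mem_filter] at hx
          have := hx.2; simp only [decide_eq_true_eq] at this
          exact (pv_cat1_iff t x (hnowin x hx.1)).mpr this
        have hy1 : pvCat t y = 1 := by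
          rw [hg_def, List.mem_filter] at hy
          have := hy.2; simp only [decide_eq_true_eq] at this
          exact (pv_cat1_iff t y (hnowin y hy.1)).mpr this
        unfold pvK
        rw [hx1, hy1, pv_sec1 t x hx1, pv_sec1 t y hy1]
        omega
      case dom1 =>
        intro x hx y hy hpx hpy
        simp only [decide_eq_true_eq] at hpx
        simp only [decide_eq_false_iff_not] at hpy
        have hy0 := hcat_ne0 y hy
        have := pv_cat_range t y
        exact pv_K_dom t ht x y (hbAll x hx) (hbAll y hy) (by omega)
    · -- every layer is smaller than the target: first maximal-size layer
      rw [if_neg hg, hB]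
      have hcat2 : ∀ l ∈ s, pvCat t l = 2 := by
        intro l hl
        have h0 := hcat_ne0 l hl
        have hlt : ¬ ((pvGetSize l).getD 0 ≥ t) := by
          intro hge
          have : l ∈ g := by
            rw [hg_def, List.mem_filter]
            exact ⟨hl, by simp [hge]⟩
          rw [not_not.mp (fun h => hg h)] at this
          simp at this
        have := pv_cat_range t l
        have h1 : pvCat t l ≠ 1 := fun h1 =>
          hlt ((pv_cat1_iff t l (hnowin l hl)).mp h1)
        omega
      have h1 : PySem.List.min? s (fun x => -((fun layer => (pvGetSize layer).getD 0) x)) =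
          PySem.List.max? s (fun layer => (pvGetSize layer).getD 0) :=
        pv_min?_neg (fun layer => (pvGetSize layer).getD 0) s
      have h2 : PySem.List.min? s (pvK t) =
          PySem.List.min? s (fun x => -((fun layer => (pvGetSize layer).getD 0) x)) :=
        pv_min?_congr _ _ s (fun x hx y hy => by
          have hx2 := hcat2 x hx
          have hy2 := hcat2 y hy
          simp only
          unfold pvK
          rw [hx2, hy2, pv_sec2 t x hx2, pv_sec2 t y hy2]
          omega)
      rw [h2, h1]
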